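-- pv_equiv track=rewrite | github.com/kruzda/project_euler_solutions | euler017.py | print_numbers_as_letters
-- ===== SOURCE A (Python) =====
-- d = {	1: "one",
-- 		2: "two",
-- 		3: "three",
-- 		4: "four",
-- 		5: "five",
-- 		6: "six",
-- 		7: "seven",
-- 		8: "eight",
-- 		9: "nine",
-- 		10: "ten",
-- 		11: "eleven",
-- 		12: "twelve",
-- 		13: "thirteen",
-- 		15: "fifteen",
-- 		18: "eighteen",
-- 		20:	"twenty",
-- 		30: "thirty",
-- 		40: "forty",
-- 	    50: "fifty",
-- 		80: "eighty",
-- 		100: "hundred",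
-- 		1000: "thousand"
-- 	}
--
-- def print_numbers_as_letters(n):
-- 	result = ""
-- 	i = n
-- 	y = len(d)
-- 	while 0 < i and 0 < y:
-- 		dd = max(sorted(d)[:y])
-- 		if dd <= i:
-- 			if 1000 <= dd:
-- 				multiples_of_thousand = i // 1000
-- 				i -= multiples_of_thousand * 1000
-- 				if 0 < i <= 100:
-- 					filler = "and"
-- 				else:
-- 					filler = ""
-- 				result += d[multiples_of_thousand] + d[1000] + filler
-- 			elif 100 <= dd:
-- 				multiples_of_hundred = i // 100
-- 				i -= multiples_of_hundred * 100
-- 				if i != 0: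
-- 					filler = "and"
-- 				else:
-- 					filler = ""
-- 				result += d[multiples_of_hundred] + d[100] + filler
-- 			elif 20 <= dd:
-- 				multiples_of_ten = i // 10
-- 				if not multiples_of_ten * 10 in d.keys():
-- 					result += d[multiples_of_ten] + "ty"
-- 				else:
-- 					result += d[multiples_of_ten * 10]
-- 				i -= multiples_of_ten * 10
-- 			else:
-- 				if i < 20 and not i in d.keys():
-- 					result += d[i-10] + "teen"
-- 					i = 0
-- 				else:
-- 					result += d[dd]
-- 					i -= dd
-- 		else:
-- 			y -= 1
-- 	return(result)
-- ===== SOURCE B (Python) =====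
-- d = {	1: "one",
-- 		2: "two",
-- 		3: "three",
-- 		4: "four",
-- 		5: "five",
-- 		6: "six",
-- 		7: "seven",
-- 		8: "eight",
-- 		9: "nine",
-- 		10: "ten",
-- 		11: "eleven",
-- 		12: "twelve",
-- 		13: "thirteen",
-- 		15: "fifteen",
-- 		18: "eighteen",
-- 		20:	"twenty",
-- 		30: "thirty",
-- 		40: "forty",
-- 	    50: "fifty",
-- 		80: "eighty",
-- 		100: "hundred",
-- 		1000: "thousand"
-- 	}
--
-- def print_numbers_as_letters(n):
-- 	parts = []
-- 	rem = n
-- 	if rem >= 1000: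
-- 		t, rem = divmod(rem, 1000)
-- 		parts.append(d[t] + d[1000] + ("and" if 0 < rem <= 100 else ""))
-- 	if rem >= 100:
-- 		h, rem = divmod(rem, 100)
-- 		parts.append(d[h] + d[100] + ("and" if rem != 0 else ""))
-- 	if rem >= 20:
-- 		t = rem // 10
-- 		parts.append(d[t * 10] if t * 10 in d else d[t] + "ty")
-- 		rem -= t * 10
-- 	if rem >= 10:
-- 		parts.append(d[rem] if rem in d else d[rem - 10] + "teen")
-- 	elif rem >= 1:
-- 		parts.append(d[rem])
-- 	return "".join(parts)
-- ===== Notes on version B (the rewrite author's own statement) =====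
-- stated objective: simpler
-- what changed: Replaces the while-loop that re-sorts the dict keys and scans a y counter down on every iteration with a direct straight-line place-value decomposition (thousands, hundreds, tens, teens/units) over the same dict.
import Mathlib
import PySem

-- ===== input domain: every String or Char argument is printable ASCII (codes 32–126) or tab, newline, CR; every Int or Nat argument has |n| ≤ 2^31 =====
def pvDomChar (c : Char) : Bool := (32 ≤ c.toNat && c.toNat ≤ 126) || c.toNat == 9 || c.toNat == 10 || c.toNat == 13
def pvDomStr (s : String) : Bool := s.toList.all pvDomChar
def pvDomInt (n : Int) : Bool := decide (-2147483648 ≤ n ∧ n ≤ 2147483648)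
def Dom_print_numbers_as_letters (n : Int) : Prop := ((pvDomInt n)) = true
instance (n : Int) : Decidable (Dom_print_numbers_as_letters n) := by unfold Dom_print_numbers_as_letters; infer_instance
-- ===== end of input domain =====

-- B replaces A's while-loop (which re-sorts the dict keys and walks a y counter down on every
-- iteration) by a straight-line place-value decomposition: thousands, hundreds, tens, units.
-- Objective: simpler. Python d[k] (KeyError) is ported as getD ""; Pre_ excludes exactly the
-- inputs on which the Python (A and B identically) raises KeyError.

-- ===== PORT A =====
-- the module-level dict d (shared context of both Python versions)
def pvD : PySem.Dict Int String := PySem.Dict.ofList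
  [(1,"one"),(2,"two"),(3,"three"),(4,"four"),(5,"five"),(6,"six"),(7,"seven"),(8,"eight"),(9,"nine"),
   (10,"ten"),(11,"eleven"),(12,"twelve"),(13,"thirteen"),(15,"fifteen"),(18,"eighteen"),
   (20,"twenty"),(30,"thirty"),(40,"forty"),(50,"fifty"),(80,"eighty"),(100,"hundred"),(1000,"thousand")]

-- dd = max(sorted(d)[:y])  (Python max raises on an empty list; y > 0 keeps it nonempty, getD 0 unreached)
def pvDD (y : Int) : Int :=
  ((PySem.List.max? (PySem.List.slice (PySem.List.sorted pvD.keys (fun k => k) false) none (some y)) (fun k => k)).getD 0)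

-- the while loop of A (result is the accumulator, i and y the loop variables); fuel is only a
-- structural-termination guard: every run of the loop finishes in well under 100 iterations
-- (at most 22 y-decrements plus a handful of subtracting steps), so fuel 100 never runs out.
def pvLoopA (fuel : Nat) (i : Int) (y : Int) (result : String) : String :=
  match fuel with
  | 0 => result
  | fuel + 1 =>
    if 0 < i ∧ 0 < y then
      let dd := pvDD y
      if dd ≤ i then
        if 1000 ≤ dd then
          let mt := PySem.Int.floordiv i 1000
          let i' := i - mt * 1000
          let filler := if 0 < i' ∧ i' ≤ 100 then "and" else ""
          pvLoopA fuel i' y (result ++ (pvD.getD mt "" ++ pvD.getD 1000 "" ++ filler))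
        else if 100 ≤ dd then
          let mh := PySem.Int.floordiv i 100
          let i' := i - mh * 100
          let filler := if i' ≠ 0 then "and" else ""
          pvLoopA fuel i' y (result ++ (pvD.getD mh "" ++ pvD.getD 100 "" ++ filler))
        else if 20 ≤ dd then
          let mt := PySem.Int.floordiv i 10
          if ¬ (pvD.contains (mt * 10)) then
            pvLoopA fuel (i - mt * 10) y (result ++ (pvD.getD mt "" ++ "ty"))
          else
            pvLoopA fuel (i - mt * 10) y (result ++ pvD.getD (mt * 10) "")
        else
          if i < 20 ∧ ¬ (pvD.contains i) then
            pvLoopA fuel 0 y (result ++ (pvD.getD (i - 10) "" ++ "teen"))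
          else
            pvLoopA fuel (i - dd) y (result ++ pvD.getD dd "")
      else
        pvLoopA fuel i (y - 1) result
    else result

def print_numbers_as_letters (n : Int) : String :=
  pvLoopA 100 n ((pvD.size : Nat) : Int) ""

-- ===== PORT B =====
def print_numbers_as_letters_alt (n : Int) : String :=
  let rem := n
  let pr :=
    if 1000 ≤ rem then
      let t := PySem.Int.floordiv rem 1000
      let r := PySem.Int.mod rem 1000
      (([pvD.getD t "" ++ pvD.getD 1000 "" ++ (if 0 < r ∧ r ≤ 100 then "and" else "")] : List String), r)
    else (([] : List String), rem)
  let pr :=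
    if 100 ≤ pr.2 then
      let h := PySem.Int.floordiv pr.2 100
      let r := PySem.Int.mod pr.2 100
      (pr.1 ++ [pvD.getD h "" ++ pvD.getD 100 "" ++ (if r ≠ 0 then "and" else "")], r)
    else pr
  let pr :=
    if 20 ≤ pr.2 then
      let t := PySem.Int.floordiv pr.2 10
      (pr.1 ++ [if pvD.contains (t * 10) then pvD.getD (t * 10) "" else pvD.getD t "" ++ "ty"], pr.2 - t * 10)
    else pr
  let parts :=
    if 10 ≤ pr.2 then
      pr.1 ++ [if pvD.contains pr.2 then pvD.getD pr.2 "" else pvD.getD (pr.2 - 10) "" ++ "teen"]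
    else if 1 ≤ pr.2 then pr.1 ++ [pvD.getD pr.2 ""]
    else pr.1
  PySem.Str.join "" parts

-- ===== PRECONDITION & SPEC =====
-- Pre_ excludes exactly the inputs on which the Python A raises KeyError (inputs of a thousand
-- or more whose thousands group n//1000 is not a key of d, e.g. fourteen thousand); B raises
-- the same KeyError on the same inputs, so no input on which A returns a value is excluded.
def Pre_print_numbers_as_letters (n : Int) : Prop :=
  n < 1000 ∨ PySem.Int.floordiv n 1000 ∈ ([1,2,3,4,5,6,7,8,9,10,11,12,13,15,18,20,30,40,50,80,100,1000] : List Int)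
instance (n : Int) : Decidable (Pre_print_numbers_as_letters n) := by unfold Pre_print_numbers_as_letters; infer_instance
def pvWitness_print_numbers_as_letters : Int := 2101

def Spec_print_numbers_as_letters (n : Int) (out : String) : Prop := out = print_numbers_as_letters_alt n
instance (n : Int) (out : String) : Decidable (Spec_print_numbers_as_letters n out) := by unfold Spec_print_numbers_as_letters; infer_instance

-- ===== CLAIM (what is proved, stated in full; the proofs are below) =====
def Claim_equal_print_numbers_as_letters : Prop := ∀ (n : Int), Dom_print_numbers_as_letters n → Pre_print_numbers_as_letters n → Spec_print_numbers_as_letters n (print_numbers_as_letters n)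

-- ===== LEMMAS AND PROOFS =====

theorem pv_join_nil : PySem.Str.join "" ([] : List String) = "" := by decide

theorem pv_join_cons (a : String) (l : List String) :
    PySem.Str.join "" (a :: l) = a ++ PySem.Str.join "" l := by
  cases l with
  | nil => simp [PySem.Str.join, PySem.Chars.join, List.intercalate, String.ofList_toList]
  | cons b t =>
    simp [PySem.Str.join, PySem.Chars.join, List.intercalate,
      String.ofList_append, String.ofList_toList]

-- dd at the two scan levels the symbolic proof passes through
theorem pv_dd22 : pvDD 22 = 1000 := by decide
theorem pv_dd21 : pvDD 21 = 100 := by decide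

-- B's last three stages, named so the proofs can peel one leading piece at a time
def pvStage4 (pr : List String × Int) : String :=
  let parts :=
    if 10 ≤ pr.2 then
      pr.1 ++ [if pvD.contains pr.2 then pvD.getD pr.2 "" else pvD.getD (pr.2 - 10) "" ++ "teen"]
    else if 1 ≤ pr.2 then pr.1 ++ [pvD.getD pr.2 ""]
    else pr.1
  PySem.Str.join "" parts

def pvStage3 (pr : List String × Int) : String :=
  pvStage4 (if 20 ≤ pr.2 then
      let t := PySem.Int.floordiv pr.2 10
      (pr.1 ++ [if pvD.contains (t * 10) then pvD.getD (t * 10) "" else pvD.getD t "" ++ "ty"], pr.2 - t * 10)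
    else pr)

def pvStage2 (pr : List String × Int) : String :=
  pvStage3 (if 100 ≤ pr.2 then
      let h := PySem.Int.floordiv pr.2 100
      let r := PySem.Int.mod pr.2 100
      (pr.1 ++ [pvD.getD h "" ++ pvD.getD 100 "" ++ (if r ≠ 0 then "and" else "")], r)
    else pr)

theorem pv_alt_eq (n : Int) :
    print_numbers_as_letters_alt n =
      pvStage2 (if 1000 ≤ n then
          (([pvD.getD (PySem.Int.floordiv n 1000) "" ++ pvD.getD 1000 "" ++
            (if 0 < PySem.Int.mod n 1000 ∧ PySem.Int.mod n 1000 ≤ 100 then "and" else "")] : List String),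
            PySem.Int.mod n 1000)
        else (([] : List String), n)) := rfl

theorem pv_stage4_cons (p : String) (l : List String) (m : Int) :
    pvStage4 (p :: l, m) = p ++ pvStage4 (l, m) := by
  simp only [pvStage4]
  split_ifs <;> simp only [List.cons_append, pv_join_cons]

theorem pv_stage3_cons (p : String) (l : List String) (m : Int) :
    pvStage3 (p :: l, m) = p ++ pvStage3 (l, m) := by
  simp only [pvStage3]
  split_ifs <;> simp only [List.cons_append, pv_stage4_cons]

theorem pv_stage2_cons (p : String) (l : List String) (m : Int) :
    pvStage2 (p :: l, m) = p ++ pvStage2 (l, m) := by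
  simp only [pvStage2]
  split_ifs <;> simp only [List.cons_append, pv_stage3_cons]

-- B on a sub-thousand input enters at stage 2 with no pieces yet
theorem pv_alt_low (m : Int) (h : m < 1000) :
    print_numbers_as_letters_alt m = pvStage2 ([], m) := by
  rw [pv_alt_eq, if_neg (by omega)]

-- the accumulator of A's loop is just a prefix
theorem pvLoopA_acc (fuel : Nat) : ∀ (i y : Int) (result : String),
    pvLoopA fuel i y result = result ++ pvLoopA fuel i y "" := by
  induction fuel with
  | zero => intro i y result; simp [pvLoopA]
  | succ f ih =>
    intro i y result
    simp only [pvLoopA]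
    split_ifs with h h1 h2 h3 h4 h5 h6
    all_goals
      first
        | (simp [String.append_empty]; done)
        | ((conv_lhs => rw [ih])
           try (conv_rhs => rw [ih])
           try simp [String.append_assoc, String.empty_append])

-- does A's loop finish within `fuel` iterations?  (proof-layer gadget for fuel irrelevance)
def pvTerm (fuel : Nat) (i y : Int) : Bool :=
  match fuel with
  | 0 => !(decide (0 < i ∧ 0 < y))
  | fuel + 1 =>
    if 0 < i ∧ 0 < y then
      let dd := pvDD y
      if dd ≤ i then
        if 1000 ≤ dd then pvTerm fuel (i - PySem.Int.floordiv i 1000 * 1000) y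
        else if 100 ≤ dd then pvTerm fuel (i - PySem.Int.floordiv i 100 * 100) y
        else if 20 ≤ dd then pvTerm fuel (i - PySem.Int.floordiv i 10 * 10) y
        else if i < 20 ∧ ¬ (pvD.contains i) then pvTerm fuel 0 y
        else pvTerm fuel (i - dd) y
      else pvTerm fuel i (y - 1)
    else true

-- with enough fuel the result does not depend on the fuel
theorem pvLoopA_mono (fuel : Nat) : ∀ (g : Nat) (i y : Int) (result : String),
    pvTerm fuel i y = true → fuel ≤ g → pvLoopA fuel i y result = pvLoopA g i y result := by
  induction fuel with
  | zero =>
    intro g i y result h _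
    simp only [pvTerm, Bool.not_eq_eq_eq_not, Bool.not_true, decide_eq_false_iff_not] at h
    cases g with
    | zero => rfl
    | succ g' => simp only [pvLoopA]; rw [if_neg h]
  | succ f ih =>
    intro g i y result h hg
    cases g with
    | zero => omega
    | succ g' =>
      simp only [pvTerm] at h
      simp only [pvLoopA]
      split_ifs at h ⊢ with h0 h1 h2 h3 h4 h5 h6 <;>
        first
          | rfl
          | exact ih g' _ _ _ h (by omega)

-- every sub-hundred state at scan level y = 21 finishes within 40 iterations
set_option maxRecDepth 100000 in
theorem pv_term40 : ∀ (r : Fin 100), pvTerm 40 ((r : Nat) : Int) 21 = true := by decide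

-- A's loop and B agree on all sub-hundred remainders (kernel check)
set_option maxRecDepth 100000 in
set_option maxHeartbeats 1000000 in
theorem pv_low100 : ∀ (r : Fin 100),
    pvLoopA 40 ((r : Nat) : Int) 21 "" = print_numbers_as_letters_alt ((r : Nat) : Int) := by
  decide

theorem pv_term40_int (r : Int) (h0 : 0 ≤ r) (h1 : r < 100) : pvTerm 40 r 21 = true := by
  have hr : r = ((r.toNat : Nat) : Int) := by omega
  rw [hr]; exact pv_term40 ⟨r.toNat, by omega⟩

theorem pv_low100_int (r : Int) (h0 : 0 ≤ r) (h1 : r < 100) :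
    pvLoopA 40 r 21 "" = print_numbers_as_letters_alt r := by
  have hr : r = ((r.toNat : Nat) : Int) := by omega
  rw [hr]; exact pv_low100 ⟨r.toNat, by omega⟩

-- a stopped loop returns its accumulator
theorem pv_guard_false (f : Nat) (i y : Int) (res : String) (h : ¬ (0 < i ∧ 0 < y)) :
    pvLoopA f i y res = res := by
  cases f with
  | zero => rfl
  | succ f' => simp only [pvLoopA]; rw [if_neg h]

-- one skip step of A's loop (dd too big, y decremented)
theorem pv_skip (f : Nat) (i y : Int) (res : String) (h : 0 < i) (hy : 0 < y)
    (hdd : i < pvDD y) : pvLoopA (f + 1) i y res = pvLoopA f i (y - 1) res := by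
  simp only [pvLoopA]
  rw [if_pos ⟨h, hy⟩, if_neg (by omega)]

-- the thousands step of A's loop
theorem pv_thousand (f : Nat) (i : Int) (res : String) (h : 1000 ≤ i) :
    pvLoopA (f + 1) i 22 res =
      pvLoopA f (PySem.Int.mod i 1000) 22
        (res ++ (pvD.getD (PySem.Int.floordiv i 1000) "" ++ pvD.getD 1000 "" ++
          (if 0 < PySem.Int.mod i 1000 ∧ PySem.Int.mod i 1000 ≤ 100 then "and" else ""))) := by
  have hm : i - PySem.Int.floordiv i 1000 * 1000 = PySem.Int.mod i 1000 := by
    have := PySem.Int.floordiv_mul_add_mod i 1000; omega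
  simp only [pvLoopA, pv_dd22]
  rw [if_pos ⟨by omega, by omega⟩, if_pos (by omega : (1000:Int) ≤ i),
    if_pos (by omega : (1000:Int) ≤ 1000), hm]

-- the hundreds step of A's loop at scan level 21
theorem pv_hundred (f : Nat) (i : Int) (res : String) (h1 : 100 ≤ i) (h2 : i < 1000) :
    pvLoopA (f + 1) i 21 res =
      pvLoopA f (PySem.Int.mod i 100) 21
        (res ++ (pvD.getD (PySem.Int.floordiv i 100) "" ++ pvD.getD 100 "" ++
          (if PySem.Int.mod i 100 ≠ 0 then "and" else ""))) := by
  have hm : i - PySem.Int.floordiv i 100 * 100 = PySem.Int.mod i 100 := by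
    have := PySem.Int.floordiv_mul_add_mod i 100; omega
  simp only [pvLoopA, pv_dd21]
  rw [if_pos ⟨by omega, by omega⟩, if_pos (by omega : (100:Int) ≤ i),
    if_neg (by omega : ¬ (1000:Int) ≤ 100), if_pos (by omega : (100:Int) ≤ 100), hm]

-- B on a nonpositive input returns ""
theorem pv_alt_nonpos (n : Int) (h : n ≤ 0) : print_numbers_as_letters_alt n = "" := by
  rw [pv_alt_low n (by omega)]
  simp only [pvStage2, pvStage3, pvStage4]
  rw [if_neg (by omega : ¬ (100:Int) ≤ ((([] : List String), n) : List String × Int).2)]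
  rw [if_neg (by omega : ¬ (20:Int) ≤ ((([] : List String), n) : List String × Int).2)]
  rw [if_neg (by omega : ¬ (10:Int) ≤ ((([] : List String), n) : List String × Int).2),
    if_neg (by omega : ¬ (1:Int) ≤ ((([] : List String), n) : List String × Int).2)]
  exact pv_join_nil

-- B on n ≥ 1000 splits into the thousands piece and B of the remainder
theorem pv_alt_split (n : Int) (h : 1000 ≤ n) :
    print_numbers_as_letters_alt n =
      (pvD.getD (PySem.Int.floordiv n 1000) "" ++ pvD.getD 1000 "" ++
        (if 0 < PySem.Int.mod n 1000 ∧ PySem.Int.mod n 1000 ≤ 100 then "and" else "")) ++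
      print_numbers_as_letters_alt (PySem.Int.mod n 1000) := by
  have hm1 : PySem.Int.mod n 1000 < 1000 := by
    rw [PySem.Int.mod_eq_emod_of_pos (by omega)]; exact Int.emod_lt_of_pos n (by omega)
  rw [pv_alt_eq n, if_pos h, pv_stage2_cons, pv_alt_low _ hm1]

-- B on 100 ≤ r < 1000 splits into the hundreds piece and B of the remainder
theorem pv_alt_split100 (r : Int) (h1 : 100 ≤ r) (h2 : r < 1000) :
    print_numbers_as_letters_alt r =
      (pvD.getD (PySem.Int.floordiv r 100) "" ++ pvD.getD 100 "" ++
        (if PySem.Int.mod r 100 ≠ 0 then "and" else "")) ++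
      print_numbers_as_letters_alt (PySem.Int.mod r 100) := by
  have hm1 : PySem.Int.mod r 100 < 100 := by
    rw [PySem.Int.mod_eq_emod_of_pos (by omega)]; exact Int.emod_lt_of_pos r (by omega)
  rw [pv_alt_low r h2, pv_alt_low _ (by omega)]
  conv_lhs => rw [pvStage2]
  conv_rhs => rw [pvStage2]
  rw [if_pos (by exact h1 : (100:Int) ≤ ((([] : List String), r) : List String × Int).2),
    if_neg (by omega : ¬ (100:Int) ≤ ((([] : List String), PySem.Int.mod r 100) : List String × Int).2)]
  simp only [List.nil_append]
  exact pv_stage3_cons _ [] _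

-- A's loop from the top scan level equals B on every remainder 0 ≤ r < 1000
theorem pv_main_low (f : Nat) (hf : 41 ≤ f) (r : Int) (h0 : 0 ≤ r) (h1 : r < 1000) :
    pvLoopA (f + 1) r 22 "" = print_numbers_as_letters_alt r := by
  by_cases hz : r = 0
  · subst hz
    rw [pv_alt_nonpos 0 le_rfl]
    simp only [pvLoopA]
    rw [if_neg (by omega)]
  · have hr0 : 0 < r := by omega
    rw [pv_skip f r 22 "" hr0 (by omega) (by rw [pv_dd22]; omega)]
    norm_num
    by_cases hcomp : r < 100
    · rw [← pvLoopA_mono 40 f r 21 "" (pv_term40_int r h0 hcomp) (by omega)]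
      exact pv_low100_int r h0 hcomp
    · obtain ⟨f', rfl⟩ : ∃ f', f = f' + 1 := ⟨f - 1, by omega⟩
      have hm0 : 0 ≤ PySem.Int.mod r 100 := by
        rw [PySem.Int.mod_eq_emod_of_pos (by omega)]; exact Int.emod_nonneg r (by omega)
      have hm1 : PySem.Int.mod r 100 < 100 := by
        rw [PySem.Int.mod_eq_emod_of_pos (by omega)]; exact Int.emod_lt_of_pos r (by omega)
      rw [pv_hundred f' r "" (by omega) h1, pvLoopA_acc, String.empty_append,
        ← pvLoopA_mono 40 f' _ 21 "" (pv_term40_int _ hm0 hm1) (by omega),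
        pv_low100_int _ hm0 hm1, ← pv_alt_split100 r (by omega) h1]

-- ===== VERDICT (by name: the statement is the Claim_ definition above) =====
theorem print_numbers_as_letters_spec : Claim_equal_print_numbers_as_letters := by
  intro n _ _
  unfold Spec_print_numbers_as_letters
  have hA : print_numbers_as_letters n = pvLoopA (99 + 1) n 22 "" := rfl
  by_cases h0 : n ≤ 0
  · rw [pv_alt_nonpos n h0, hA]
    exact pv_guard_false _ n 22 "" (by omega)
  · by_cases h1 : n < 1000
    · rw [hA]
      exact pv_main_low 99 (by omega) n (by omega) h1
    · have hm0 : 0 ≤ PySem.Int.mod n 1000 := by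
        rw [PySem.Int.mod_eq_emod_of_pos (by omega)]; exact Int.emod_nonneg n (by omega)
      have hm1 : PySem.Int.mod n 1000 < 1000 := by
        rw [PySem.Int.mod_eq_emod_of_pos (by omega)]; exact Int.emod_lt_of_pos n (by omega)
      rw [hA,
        pv_thousand 99 n "" (by omega), pvLoopA_acc, String.empty_append,
        show (99:Nat) = 98 + 1 from rfl,
        pv_main_low 98 (by omega) _ hm0 hm1,
        ← pv_alt_split n (by omega)]
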